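-- pv_equiv track=rewrite | github.com/Wixiyo/Chinese_inscription_ocr | work/tools/cutter.py | split_projection_list
-- ===== SOURCE A (Python) =====
-- def split_projection_list(projectionList: list, minValue=0):
--     start = 0
--     end = None
--
--     split_list = []
--     for idx, value in enumerate(projectionList):
--         if value > minValue:
--             end = idx
--         else:
--             if end is not None:
--                 split_list.append((start, end))
--                 end = None
--             start = idx
--     else:
--         if end is not None:
--             split_list.append((start, end))
--             end = None
--     return split_list
-- ===== SOURCE B (Python) =====
-- def split_projection_list(projectionList: list, minValue=0):
--     # collect indices above threshold, then group them into maximal consecutive runs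
--     idxs = [i for i, v in enumerate(projectionList) if v > minValue]
--     segments = []
--     cur = None
--     for i in idxs:
--         if cur is not None and i == cur[1] + 1:
--             cur = (cur[0], i)
--         else:
--             if cur is not None:
--                 segments.append(cur)
--             cur = (i, i)
--     if cur is not None:
--         segments.append(cur)
--     return [(max(0, f - 1), l) for f, l in segments]
-- ===== Notes on version B (the rewrite author's own statement) =====
-- stated objective: alternative
-- what changed: Replaced A's one-pass start/end state machine with a two-phase decomposition: collect the above-threshold indices, group them into maximal consecutive runs, and emit (max(0, first-1), last) per run.
import Mathlib
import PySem

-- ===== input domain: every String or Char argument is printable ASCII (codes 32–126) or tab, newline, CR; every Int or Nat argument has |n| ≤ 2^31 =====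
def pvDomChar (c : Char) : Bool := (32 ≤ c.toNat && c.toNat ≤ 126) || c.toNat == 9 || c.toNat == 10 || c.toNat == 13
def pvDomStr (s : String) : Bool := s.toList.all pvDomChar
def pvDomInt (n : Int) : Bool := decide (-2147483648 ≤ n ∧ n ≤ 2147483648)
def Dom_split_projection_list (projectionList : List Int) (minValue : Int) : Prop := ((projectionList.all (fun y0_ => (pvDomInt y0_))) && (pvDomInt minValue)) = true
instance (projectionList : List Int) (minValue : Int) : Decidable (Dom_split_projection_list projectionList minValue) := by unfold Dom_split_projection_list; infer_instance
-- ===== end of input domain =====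

-- B replaces A's single-pass start/end state machine by: collect the above-threshold
-- indices, group them into maximal consecutive runs, emit (max 0 (first-1), last);
-- objective: alternative decomposition, same cost.

-- ===== PORT A =====
-- state is (start, end, split_list); one step of A's for-loop body
def stepA (m : Int) : (Int × Option Int × List (Int × Int)) → (Int × Int) → (Int × Option Int × List (Int × Int))
  | (start, e, acc), (idx, value) =>
    if value > m then (start, some idx, acc)
    else match e with
      | some ev => (idx, none, acc ++ [(start, ev)])
      | none => (idx, none, acc)

-- the for-else tail of A
def finishA : (Int × Option Int × List (Int × Int)) → List (Int × Int)
  | (start, some ev, acc) => acc ++ [(start, ev)]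
  | (_, none, acc) => acc

def split_projection_list (projectionList : List Int) (minValue : Int) : List (Int × Int) :=
  finishA ((PySem.List.enumerate projectionList 0).foldl (stepA minValue) (0, none, []))

-- ===== PORT B =====
-- one step of B's grouping loop over the index list; state is (segments, cur)
def stepB : (List (Int × Int) × Option (Int × Int)) → Int → (List (Int × Int) × Option (Int × Int))
  | (segs, some c), i => if i = c.2 + 1 then (segs, some (c.1, i)) else (segs ++ [c], some (i, i))
  | (segs, none), i => (segs, some (i, i))

def finishB : (List (Int × Int) × Option (Int × Int)) → List (Int × Int)
  | (segs, some c) => segs ++ [c]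
  | (segs, none) => segs

def split_projection_list_alt (projectionList : List Int) (minValue : Int) : List (Int × Int) :=
  let idxs := ((PySem.List.enumerate projectionList 0).filter (fun p => decide (p.2 > minValue))).map (fun p => p.1)
  (finishB (idxs.foldl stepB ([], none))).map (fun fl => (max 0 (fl.1 - 1), fl.2))

-- ===== PRECONDITION & SPEC =====
def Spec_split_projection_list (projectionList : List Int) (minValue : Int) (out : List (Int × Int)) : Prop := out = split_projection_list_alt projectionList minValue
instance (projectionList : List Int) (minValue : Int) (out : List (Int × Int)) : Decidable (Spec_split_projection_list projectionList minValue out) := by unfold Spec_split_projection_list; infer_instance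

-- ===== CLAIM (what is proved, stated in full; the proofs are below) =====
def Claim_equal_split_projection_list : Prop := ∀ (projectionList : List Int) (minValue : Int), Dom_split_projection_list projectionList minValue → Spec_split_projection_list projectionList minValue (split_projection_list projectionList minValue)

-- ===== LEMMAS AND PROOFS =====

-- proof-only helpers: the above-threshold indices of vs starting at offset n
def idxsF (m n : Int) : List Int → List Int
  | [] => []
  | v :: vs => if v > m then n :: idxsF m (n + 1) vs else idxsF m (n + 1) vs

-- the segments produced from an open run with (already adjusted) start s and last index l
def goA (s l : Int) : List Int → List (Int × Int)
  | [] => [(s, l)]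
  | i :: rest => if i = l + 1 then goA s i rest else (s, l) :: goA (max 0 (i - 1)) i rest

def runsR (l : List Int) : List (Int × Int) :=
  match l with
  | [] => []
  | i :: rest => goA (max 0 (i - 1)) i rest

theorem idxs_bridge (m : Int) : ∀ (vs : List Int) (n : Int),
    ((PySem.List.enumerate vs n).filter (fun p => decide (p.2 > m))).map (fun p => p.1) = idxsF m n vs := by
  intro vs
  induction vs with
  | nil => intro n; simp [PySem.List.enumerate_nil, idxsF]
  | cons v vs ih =>
    intro n
    by_cases h : v > m <;>
      simp [PySem.List.enumerate_cons, idxsF, h, ih]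

theorem idxs_ge (m : Int) : ∀ (vs : List Int) (n i : Int), i ∈ idxsF m n vs → n ≤ i := by
  intro vs
  induction vs with
  | nil => intro n i h; simp [idxsF] at h
  | cons v vs ih =>
    intro n i h
    simp only [idxsF] at h
    split at h
    · rcases List.mem_cons.1 h with h | h
      · omega
      · have := ih (n + 1) i h; omega
    · have := ih (n + 1) i h; omega

theorem aLoop_eq (m : Int) : ∀ (vs : List Int) (n : Int) (acc : List (Int × Int)), 0 ≤ n →
    (finishA ((PySem.List.enumerate vs n).foldl (stepA m) (max 0 (n - 1), none, acc))
        = acc ++ runsR (idxsF m n vs))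
    ∧ (∀ s : Int, finishA ((PySem.List.enumerate vs n).foldl (stepA m) (s, some (n - 1), acc))
        = acc ++ goA s (n - 1) (idxsF m n vs)) := by
  intro vs
  induction vs with
  | nil =>
    intro n acc _
    constructor
    · simp [PySem.List.enumerate_nil, idxsF, runsR, finishA]
    · intro s; simp [PySem.List.enumerate_nil, idxsF, goA, finishA]
  | cons v vs ih =>
    intro n acc hn
    have hn1 : (0 : Int) ≤ n + 1 := by omega
    constructor
    · by_cases h : v > m
      · -- enter a run: end := n, start unchanged
        have h2 := (ih (n + 1) acc hn1).2 (max 0 (n - 1))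
        have e1 : (n + 1 : Int) - 1 = n := by omega
        rw [e1] at h2
        simp only [PySem.List.enumerate_cons, List.foldl_cons, stepA, h, if_pos]
        rw [h2]
        simp only [idxsF, h, if_pos, runsR]
      · -- below: start := n, end stays none
        have h1 := (ih (n + 1) acc hn1).1
        have e1 : max 0 ((n + 1 : Int) - 1) = n := by omega
        rw [e1] at h1
        simp only [PySem.List.enumerate_cons, List.foldl_cons, stepA, h, if_neg, not_false_iff]
        rw [h1]
        simp only [idxsF, h, if_neg, not_false_iff]
    · intro s
      by_cases h : v > m
      · -- run continues
        have h2 := (ih (n + 1) acc hn1).2 s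
        have e1 : (n + 1 : Int) - 1 = n := by omega
        rw [e1] at h2
        simp only [PySem.List.enumerate_cons, List.foldl_cons, stepA, h, if_pos]
        rw [h2]
        simp only [idxsF, h, if_pos, goA]
        rw [if_pos (by omega)]
      · -- run closes: append (s, n-1), start := n
        have h1 := (ih (n + 1) (acc ++ [(s, n - 1)]) hn1).1
        have e1 : max 0 ((n + 1 : Int) - 1) = n := by omega
        rw [e1] at h1
        simp only [PySem.List.enumerate_cons, List.foldl_cons, stepA, h, if_neg, not_false_iff]
        rw [h1]
        simp only [idxsF, h, if_neg, not_false_iff, List.append_assoc]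
        congr 1
        cases hrest : idxsF m (n + 1) vs with
        | nil => simp [runsR, goA]
        | cons i rest =>
          have hi : n + 1 ≤ i := idxs_ge m vs (n + 1) i (by rw [hrest]; exact List.mem_cons_self)
          simp only [runsR, goA]
          rw [if_neg (by omega)]
          simp

theorem bLoop_some : ∀ (l : List Int) (segs : List (Int × Int)) (f lst : Int),
    (finishB (l.foldl stepB (segs, some (f, lst)))).map (fun fl => (max 0 (fl.1 - 1), fl.2))
      = segs.map (fun fl => (max 0 (fl.1 - 1), fl.2)) ++ goA (max 0 (f - 1)) lst l := by
  intro l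
  induction l with
  | nil => intro segs f lst; simp [finishB, goA]
  | cons i l ih =>
    intro segs f lst
    by_cases h : i = lst + 1
    · simp only [List.foldl_cons, stepB, h, if_pos]
      rw [ih]
      simp [goA]
    · simp only [List.foldl_cons, stepB, h, if_neg, not_false_iff]
      rw [ih]
      simp [goA, h]

theorem bLoop_none (l : List Int) :
    (finishB (l.foldl stepB ([], none))).map (fun fl => (max 0 (fl.1 - 1), fl.2)) = runsR l := by
  cases l with
  | nil => simp [finishB, runsR]
  | cons i rest =>
    simp only [List.foldl_cons, stepB]
    rw [bLoop_some]
    simp [runsR]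

-- ===== VERDICT (by name: the statement is the Claim_ definition above) =====
theorem split_projection_list_spec : Claim_equal_split_projection_list := by
  intro pl m _
  unfold Spec_split_projection_list split_projection_list split_projection_list_alt
  rw [idxs_bridge, bLoop_none]
  have h := (aLoop_eq m pl 0 [] (by omega)).1
  simpa using h
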